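-- pv_equiv track=rewrite | github.com/tamcl/sudoku_solver | sudoku_solver.py | checkBlocks
-- ===== SOURCE A (Python) =====
-- def checkBlocks(fixedValues, possibleValues):
--     blockCR = [0, 3, 6]
--     for Brow in blockCR:
--         for Bcolumn in blockCR:
--             #gives all coordinates of start of the blocks
--             for number in range(9):
--                 ExistNumber = False
--                 for row in range(3):
--                     for column in range(3):
--                         try:
--                             if fixedValues[str(Brow+row)+"+"+str(Bcolumn+column)] == number:
--                                 ExistNumber = True
--                         except:
--                             pass
--                 if ExistNumber == True:
--                     for row in range(3):
--                         for column in range(3):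
--                             try:
--                                 possibleValues[str(Brow+row)+"+"+str(Bcolumn+column)].remove(number)
--                             except:
--                                 pass
--     return fixedValues, possibleValues
-- ===== SOURCE B (Python) =====
-- def checkBlocks(fixedValues, possibleValues):
--     # Per block: one pass collecting the fixed numbers present (restricted to 0..8),
--     # then one pass over the cells removing each present number from its candidate list.
--     # Mutates possibleValues' lists in place, like the original.
--     for Brow in (0, 3, 6):
--         for Bcolumn in (0, 3, 6):
--             keys = [str(Brow + row) + "+" + str(Bcolumn + column)
--                     for row in range(3) for column in range(3)]
--             present = set()
--             for k in keys:
--                 v = fixedValues.get(k)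
--                 if v is not None and 0 <= v <= 8:
--                     present.add(v)
--             numbers = sorted(present)
--             for k in keys:
--                 cell = possibleValues.get(k)
--                 if cell is not None:
--                     for n in numbers:
--                         try:
--                             cell.remove(n)
--                         except ValueError:
--                             pass
--     return fixedValues, possibleValues
-- ===== Notes on version B (the rewrite author's own statement) =====
-- stated objective: alternative
-- what changed: Instead of A's per-block loop over the nine candidate numbers, each rescanning the block's nine cells for presence before the removal pass, B makes a single presence-gathering pass over the block's cells building the set of fixed numbers in 0..8 and then, per cell, removes every present number from that cell's candidate list once.
import Mathlib
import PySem

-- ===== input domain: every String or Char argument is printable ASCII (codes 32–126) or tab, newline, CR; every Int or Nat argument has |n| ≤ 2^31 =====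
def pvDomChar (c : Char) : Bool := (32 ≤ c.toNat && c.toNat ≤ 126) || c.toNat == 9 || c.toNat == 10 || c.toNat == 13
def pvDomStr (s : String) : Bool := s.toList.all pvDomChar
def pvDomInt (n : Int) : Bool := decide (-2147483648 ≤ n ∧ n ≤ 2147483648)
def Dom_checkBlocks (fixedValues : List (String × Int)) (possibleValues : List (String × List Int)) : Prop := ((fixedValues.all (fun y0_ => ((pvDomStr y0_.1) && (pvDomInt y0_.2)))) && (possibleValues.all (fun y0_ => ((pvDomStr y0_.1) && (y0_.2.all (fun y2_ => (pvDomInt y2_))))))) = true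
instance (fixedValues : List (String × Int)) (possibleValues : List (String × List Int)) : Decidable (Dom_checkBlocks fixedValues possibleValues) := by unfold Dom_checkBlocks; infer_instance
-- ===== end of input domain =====

-- B replaces A's per-block per-number rescan of the block (9 presence scans per block) by one
-- presence-gathering pass over the block's cells followed by per-cell removals (objective: alternative).
-- Both A and B mutate possibleValues' inner lists in place in Python; the equivalence proved here is
-- about the returned value (which is those same dicts).

-- shared dict/string primitives (keys compared as Python compares strings, char by char)
-- str(a) + "+" + str(b)
def pvKey (r c : Int) : List Char := PySem.Int.toChars r ++ '+' :: PySem.Int.toChars c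

-- d[k] as Option (first match; none = KeyError)
def pvLookup (fv : List (String × Int)) (k : List Char) : Option Int :=
  match fv with
  | [] => none
  | (s, v) :: t => if s.toList = k then some v else pvLookup t k

-- ===== PORT A =====
-- try: possibleValues[key].remove(number) except: pass  — modify the first entry with key k,
-- removing the first occurrence of n from its list if present; no-op on KeyError/ValueError.
def pvRemoveAt (pv : List (String × List Int)) (k : List Char) (n : Int) : List (String × List Int) :=
  match pv with
  | [] => []
  | (s, l) :: t =>
    if s.toList = k then (s, (PySem.List.remove? l n).getD l) :: t
    else (s, l) :: pvRemoveAt t k n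

-- the ExistNumber double loop (try/except around the lookup: a missing key leaves e unchanged)
def pvExistA (fv : List (String × Int)) (Brow Bcol n : Int) : Bool :=
  (PySem.List.pyRange 0 3 1).foldl (fun e r =>
    (PySem.List.pyRange 0 3 1).foldl (fun e c =>
      if pvLookup fv (pvKey (Brow + r) (Bcol + c)) = some n then true else e) e) false

-- the removal double loop
def pvRemoveLoopA (Brow Bcol n : Int) (pv : List (String × List Int)) : List (String × List Int) :=
  (PySem.List.pyRange 0 3 1).foldl (fun pv r =>
    (PySem.List.pyRange 0 3 1).foldl (fun pv c =>
      pvRemoveAt pv (pvKey (Brow + r) (Bcol + c)) n) pv) pv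

-- for number in range(9): …
def pvNumbersA (fv : List (String × Int)) (Brow Bcol : Int) (pv : List (String × List Int)) : List (String × List Int) :=
  (PySem.List.pyRange 0 9 1).foldl (fun pv n =>
    if pvExistA fv Brow Bcol n then pvRemoveLoopA Brow Bcol n pv else pv) pv

def checkBlocks (fixedValues : List (String × Int)) (possibleValues : List (String × List Int)) : (List (String × Int)) × (List (String × List Int)) :=
  (fixedValues,
    ([0, 3, 6] : List Int).foldl (fun pv Brow =>
      ([0, 3, 6] : List Int).foldl (fun pv Bcol =>
        pvNumbersA fixedValues Brow Bcol pv) pv) possibleValues)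

-- ===== PORT B =====
-- keys = [str(Brow+row)+"+"+str(Bcolumn+column) for row in range(3) for column in range(3)]
def pvBlockKeys (Brow Bcol : Int) : List (List Char) :=
  (PySem.List.pyRange 0 3 1).flatMap (fun r =>
    (PySem.List.pyRange 0 3 1).map (fun c => pvKey (Brow + r) (Bcol + c)))

-- present-gathering pass, then sorted(present)
def pvPresent (fv : List (String × Int)) (ks : List (List Char)) : List Int :=
  PySem.List.sorted
    (ks.foldl (fun s k =>
      match pvLookup fv k with
      | some v => if 0 ≤ v ∧ v ≤ 8 then PySem.Set.add s v else s
      | none => s) PySem.Set.empty)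
    id

-- cell = possibleValues.get(k); if cell is not None: mutate it — modify the first entry with key k
def pvModifyAt (pv : List (String × List Int)) (k : List Char) (f : List Int → List Int) : List (String × List Int) :=
  match pv with
  | [] => []
  | (s, l) :: t => if s.toList = k then (s, f l) :: t else (s, l) :: pvModifyAt t k f

def pvBlockB (fv : List (String × Int)) (Brow Bcol : Int) (pv : List (String × List Int)) : List (String × List Int) :=
  let ks := pvBlockKeys Brow Bcol
  let numbers := pvPresent fv ks
  ks.foldl (fun pv k =>
    pvModifyAt pv k (fun cell =>
      numbers.foldl (fun cell n => (PySem.List.remove? cell n).getD cell) cell)) pv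

def checkBlocks_alt (fixedValues : List (String × Int)) (possibleValues : List (String × List Int)) : (List (String × Int)) × (List (String × List Int)) :=
  (fixedValues,
    ([0, 3, 6] : List Int).foldl (fun pv Brow =>
      ([0, 3, 6] : List Int).foldl (fun pv Bcol =>
        pvBlockB fixedValues Brow Bcol pv) pv) possibleValues)

-- ===== PRECONDITION & SPEC =====
def Spec_checkBlocks (fixedValues : List (String × Int)) (possibleValues : List (String × List Int)) (out : (List (String × Int)) × (List (String × List Int))) : Prop := out = checkBlocks_alt fixedValues possibleValues
instance (fixedValues : List (String × Int)) (possibleValues : List (String × List Int)) (out : (List (String × Int)) × (List (String × List Int))) : Decidable (Spec_checkBlocks fixedValues possibleValues out) := by unfold Spec_checkBlocks; infer_instance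

-- ===== CLAIM (what is proved, stated in full; the proofs are below) =====
def Claim_equal_checkBlocks : Prop := ∀ (fixedValues : List (String × Int)) (possibleValues : List (String × List Int)), Dom_checkBlocks fixedValues possibleValues → Spec_checkBlocks fixedValues possibleValues (checkBlocks fixedValues possibleValues)

-- ===== LEMMAS AND PROOFS =====

-- try/except list.remove is List.erase
theorem pvRemoveOnce_eq_erase (l : List Int) (n : Int) :
    (PySem.List.remove? l n).getD l = l.erase n := by
  by_cases h : n ∈ l
  · rw [PySem.List.remove?_eq_some_erase l n h]; rfl
  · rw [(PySem.List.remove?_eq_none_iff l n).2 h, List.erase_of_not_mem h]; rfl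

theorem pvRemoveAt_eq_modifyAt (pv : List (String × List Int)) (k : List Char) (n : Int) :
    pvRemoveAt pv k n = pvModifyAt pv k (fun l => (PySem.List.remove? l n).getD l) := by
  induction pv with
  | nil => rfl
  | cons p t ih =>
    obtain ⟨s, l⟩ := p
    simp only [pvRemoveAt, pvModifyAt]
    split_ifs with h <;> simp [ih]

theorem pvModifyAt_modifyAt (pv : List (String × List Int)) (k : List Char) (f g : List Int → List Int) :
    pvModifyAt (pvModifyAt pv k g) k f = pvModifyAt pv k (fun l => f (g l)) := by
  induction pv with
  | nil => rfl
  | cons p t ih =>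
    obtain ⟨s, l⟩ := p
    simp only [pvModifyAt]
    split_ifs with h <;> simp [pvModifyAt, h, ih]

theorem pvModifyAt_comm_ne (pv : List (String × List Int)) (k k' : List Char) (f g : List Int → List Int)
    (hne : k ≠ k') :
    pvModifyAt (pvModifyAt pv k f) k' g = pvModifyAt (pvModifyAt pv k' g) k f := by
  induction pv with
  | nil => rfl
  | cons p t ih =>
    obtain ⟨s, l⟩ := p
    simp only [pvModifyAt]
    by_cases h1 : s.toList = k
    · have h2 : ¬ s.toList = k' := fun h => hne (h1 ▸ h)
      simp [pvModifyAt, h1, hne]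
    · by_cases h2 : s.toList = k'
      · simp [pvModifyAt, h2, Ne.symm hne]
      · simp [pvModifyAt, h1, h2, ih]

-- full right-commutativity of per-(key, number) removal
theorem pvRemoveAt_right_comm (pv : List (String × List Int)) (p q : (List Char) × Int) :
    pvRemoveAt (pvRemoveAt pv p.1 p.2) q.1 q.2 = pvRemoveAt (pvRemoveAt pv q.1 q.2) p.1 p.2 := by
  obtain ⟨k, n⟩ := p
  obtain ⟨k', n'⟩ := q
  simp only
  by_cases hk : k = k'
  · subst hk
    simp only [pvRemoveAt_eq_modifyAt, pvModifyAt_modifyAt]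
    congr 1
    funext l
    simp only [pvRemoveOnce_eq_erase, List.erase_comm]
  · rw [pvRemoveAt_eq_modifyAt, pvRemoveAt_eq_modifyAt pv, pvModifyAt_comm_ne _ _ _ _ _ hk,
      ← pvRemoveAt_eq_modifyAt, ← pvRemoveAt_eq_modifyAt]

-- the transposed product lists are permutations
theorem flatMap_cons_perm {α β : Type} (ks : List α) (x : α → β) (f : α → List β) :
    (ks.flatMap (fun k => x k :: f k)).Perm (ks.map x ++ ks.flatMap f) := by
  induction ks with
  | nil => simp
  | cons k t ih =>
    simp only [List.flatMap_cons, List.map_cons, List.cons_append]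
    refine List.Perm.cons _ ?_
    refine ((List.Perm.append_left (f k) ih).trans ?_)
    refine (List.perm_append_comm).trans ?_
    rw [List.append_assoc]
    exact List.Perm.append_left _ List.perm_append_comm

theorem product_perm {α β : Type} (ns : List β) (ks : List α) :
    (ns.flatMap (fun n => ks.map (fun k => (k, n)))).Perm
      (ks.flatMap (fun k => ns.map (fun n => (k, n)))) := by
  induction ns with
  | nil => simp
  | cons n t ih =>
    simp only [List.flatMap_cons, List.map_cons]
    exact (List.Perm.append_left _ ih).trans (flatMap_cons_perm ks _ _).symm

-- interchange the number loop and the key loop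
theorem pv_interchange (ks : List (List Char)) (ns : List Int) (pv : List (String × List Int)) :
    ns.foldl (fun pv n => ks.foldl (fun pv k => pvRemoveAt pv k n) pv) pv
      = ks.foldl (fun pv k => ns.foldl (fun pv n => pvRemoveAt pv k n) pv) pv := by
  have h1 : ns.foldl (fun pv n => ks.foldl (fun pv k => pvRemoveAt pv k n) pv) pv
      = (ns.flatMap (fun n => ks.map (fun k => (k, n)))).foldl
          (fun pv (p : (List Char) × Int) => pvRemoveAt pv p.1 p.2) pv := by
    rw [List.foldl_flatMap]
    simp only [List.foldl_map]
  have h2 : ks.foldl (fun pv k => ns.foldl (fun pv n => pvRemoveAt pv k n) pv) pv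
      = (ks.flatMap (fun k => ns.map (fun n => (k, n)))).foldl
          (fun pv (p : (List Char) × Int) => pvRemoveAt pv p.1 p.2) pv := by
    rw [List.foldl_flatMap]
    simp only [List.foldl_map]
  rw [h1, h2]
  exact List.Perm.foldl_eq' (product_perm ns ks)
    (fun x _ y _ z => pvRemoveAt_right_comm z x y) pv

-- the ExistNumber fold, as a fold over the block's key list (both loop nests unroll to the same nine steps)
theorem pvExistA_eq_fold (fv : List (String × Int)) (Brow Bcol n : Int) :
    pvExistA fv Brow Bcol n
      = (pvBlockKeys Brow Bcol).foldl (fun e k => if pvLookup fv k = some n then true else e) false := rfl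

-- likewise the removal loop nest
theorem pvRemoveLoopA_eq_fold (Brow Bcol n : Int) (pv : List (String × List Int)) :
    pvRemoveLoopA Brow Bcol n pv
      = (pvBlockKeys Brow Bcol).foldl (fun pv k => pvRemoveAt pv k n) pv := rfl

-- the boolean accumulator is an existence test
theorem foldl_exist_eq_any {α : Type} (P : α → Prop) [DecidablePred P] (ks : List α) (e : Bool) :
    ks.foldl (fun e k => if P k then true else e) e = (e || ks.any (fun k => decide (P k))) := by
  induction ks generalizing e with
  | nil => simp
  | cons k t ih =>
    simp only [List.foldl_cons, List.any_cons, ih]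
    by_cases h : P k <;> simp [h]

-- membership in the present-gathering fold
theorem mem_present_fold (fv : List (String × Int)) (ks : List (List Char)) (s : PySem.Set Int) (x : Int) :
    x ∈ ks.foldl (fun s k =>
      match pvLookup fv k with
      | some v => if 0 ≤ v ∧ v ≤ 8 then PySem.Set.add s v else s
      | none => s) s
    ↔ x ∈ s ∨ ∃ k ∈ ks, pvLookup fv k = some x ∧ 0 ≤ x ∧ x ≤ 8 := by
  induction ks generalizing s with
  | nil => simp
  | cons k t ih =>
    simp only [List.foldl_cons, List.mem_cons]
    cases hl : pvLookup fv k with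
    | none =>
      rw [ih]
      constructor
      · rintro (h | ⟨k', hk', h⟩)
        · exact Or.inl h
        · exact Or.inr ⟨k', Or.inr hk', h⟩
      · rintro (h | ⟨k', (rfl | hk'), h⟩)
        · exact Or.inl h
        · rw [h.1] at hl; cases hl
        · exact Or.inr ⟨k', hk', h⟩
    | some v =>
      dsimp only
      by_cases hv : 0 ≤ v ∧ v ≤ 8
      · rw [if_pos hv, ih]
        simp only [PySem.Set.mem_add]
        constructor
        · rintro (⟨h | rfl⟩ | ⟨k', hk', h⟩)
          · exact Or.inl h
          · exact Or.inr ⟨k, Or.inl rfl, hl, hv.1, hv.2⟩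
          · exact Or.inr ⟨k', Or.inr hk', h⟩
        · rintro (h | ⟨k', (rfl | hk'), h⟩)
          · exact Or.inl (Or.inl h)
          · rw [h.1] at hl
            exact Or.inl (Or.inr (Option.some.inj hl))
          · exact Or.inr ⟨k', hk', h⟩
      · rw [if_neg hv, ih]
        constructor
        · rintro (h | ⟨k', hk', h⟩)
          · exact Or.inl h
          · exact Or.inr ⟨k', Or.inr hk', h⟩
        · rintro (h | ⟨k', (rfl | hk'), h⟩)
          · exact Or.inl h
          · rw [h.1] at hl
            obtain rfl := Option.some.inj hl
            exact absurd ⟨h.2.1, h.2.2⟩ hv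
          · exact Or.inr ⟨k', hk', h⟩

theorem nodup_present_fold (fv : List (String × Int)) (ks : List (List Char)) (s : PySem.Set Int)
    (hs : s.Nodup) :
    (ks.foldl (fun s k =>
      match pvLookup fv k with
      | some v => if 0 ≤ v ∧ v ≤ 8 then PySem.Set.add s v else s
      | none => s) s).Nodup := by
  induction ks generalizing s with
  | nil => exact hs
  | cons k t ih =>
    simp only [List.foldl_cons]
    apply ih
    cases pvLookup fv k with
    | none => exact hs
    | some v =>
      by_cases hv : 0 ≤ v ∧ v ≤ 8
      · simpa [hv] using PySem.Set.nodup_add s v hs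
      · simpa [hv] using hs

-- B's sorted present-set is A's ascending filtered number range
theorem pvPresent_eq_filter (fv : List (String × Int)) (Brow Bcol : Int) :
    pvPresent fv (pvBlockKeys Brow Bcol)
      = (PySem.List.pyRange 0 9 1).filter (fun n => pvExistA fv Brow Bcol n) := by
  apply PySem.List.sorted_eq_of_perm_of_pairwise_lt
  · refine (List.perm_ext_iff_of_nodup
      (List.Nodup.filter _ (PySem.List.nodup_pyRange_one 0 9))
      (nodup_present_fold fv _ _ List.nodup_nil)).mpr ?_
    intro x
    rw [mem_present_fold, List.mem_filter, PySem.List.mem_pyRange_one,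
      pvExistA_eq_fold, foldl_exist_eq_any]
    simp only [Bool.false_or, List.any_eq_true, decide_eq_true_eq, List.not_mem_nil, false_or]
    constructor
    · rintro ⟨⟨h0, h9⟩, k, hk, hl⟩
      exact ⟨k, hk, hl, h0, by omega⟩
    · rintro ⟨k, hk, hl, h0, h8⟩
      exact ⟨⟨h0, by omega⟩, k, hk, hl⟩
  · exact List.Pairwise.filter _ (PySem.List.pairwise_lt_pyRange_one 0 9)

-- fold of removals over a fixed key is B's single in-place modification
theorem pvModifyAt_foldl (k : List Char) (ns : List Int) (pv : List (String × List Int)) :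
    pvModifyAt pv k (fun cell => ns.foldl (fun cell n => (PySem.List.remove? cell n).getD cell) cell)
      = ns.foldl (fun pv n => pvRemoveAt pv k n) pv := by
  induction ns generalizing pv with
  | nil =>
    simp only [List.foldl_nil]
    induction pv with
    | nil => rfl
    | cons p t ih => obtain ⟨s, l⟩ := p; simp only [pvModifyAt]; split_ifs <;> simp [ih]
  | cons n t ih =>
    simp only [List.foldl_cons]
    rw [← ih, pvRemoveAt_eq_modifyAt, pvModifyAt_modifyAt]

-- the per-block transformations agree
theorem block_eq (fv : List (String × Int)) (Brow Bcol : Int) (pv : List (String × List Int)) :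
    pvNumbersA fv Brow Bcol pv = pvBlockB fv Brow Bcol pv := by
  unfold pvNumbersA pvBlockB
  have hfilter : (PySem.List.pyRange 0 9 1).foldl (fun pv n =>
        if pvExistA fv Brow Bcol n then pvRemoveLoopA Brow Bcol n pv else pv) pv
      = ((PySem.List.pyRange 0 9 1).filter (fun n => pvExistA fv Brow Bcol n)).foldl
          (fun pv n => pvRemoveLoopA Brow Bcol n pv) pv := by
    rw [List.foldl_filter]
  rw [hfilter, ← pvPresent_eq_filter]
  simp only [pvRemoveLoopA_eq_fold]
  rw [pv_interchange]
  exact (List.foldl_ext _ _ _ (fun pv k _ => pvModifyAt_foldl k _ pv)).symm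

-- ===== VERDICT (by name: the statement is the Claim_ definition above) =====
theorem checkBlocks_spec : Claim_equal_checkBlocks := by
  intro fv pv _
  unfold Spec_checkBlocks checkBlocks checkBlocks_alt
  simp only [List.foldl_cons, List.foldl_nil, block_eq]
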